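-- pv_equiv track=rewrite | github.com/hanlyang0522/AlgoSelf | 프로그래머스/unrated/132265. 롤케이크 자르기/롤케이크 자르기.py | solution
-- ===== SOURCE A (Python) =====
-- def solution(topping):
--     s1 = set()
--     s2 = set()
--     li1 = [0 for _ in range(len(topping))]
--     li2 = [0 for _ in range(len(topping))]
--
--     for i in range(len(topping)):  # O(N)
--         s1.add(topping[i])  # O(1)
--         li1[i] = len(s1)  # O(1)
--
--         s2.add(topping[-(i + 1)])
--         li2[-(i + 1)] = len(s2)
--
--     cnt = 0
--
--     for i in range(len(topping) - 1):  # O(N)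
--         if li1[i] == li2[i + 1]:
--             cnt += 1
--
--     return cnt
-- ===== SOURCE B (Python) =====
-- def solution(topping):
--     right = {}
--     for t in topping:
--         right[t] = right.get(t, 0) + 1
--     left = set()
--     cnt = 0
--     n = len(topping)
--     for i, t in enumerate(topping):
--         left.add(t)
--         right[t] -= 1
--         if right[t] == 0:
--             del right[t]
--         if i < n - 1 and len(left) == len(right):
--             cnt += 1
--     return cnt
-- ===== Notes on version B (the rewrite author's own statement) =====
-- stated objective: alternative
-- what changed: A precomputes two full distinct-count arrays (forward and backward passes over index arithmetic) and then runs a third comparison pass; B does one incremental sweep that moves each topping from a right-side counter dict (deleting keys that hit zero) into a left-side set and compares the two live sizes at each cut.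
import Mathlib
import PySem

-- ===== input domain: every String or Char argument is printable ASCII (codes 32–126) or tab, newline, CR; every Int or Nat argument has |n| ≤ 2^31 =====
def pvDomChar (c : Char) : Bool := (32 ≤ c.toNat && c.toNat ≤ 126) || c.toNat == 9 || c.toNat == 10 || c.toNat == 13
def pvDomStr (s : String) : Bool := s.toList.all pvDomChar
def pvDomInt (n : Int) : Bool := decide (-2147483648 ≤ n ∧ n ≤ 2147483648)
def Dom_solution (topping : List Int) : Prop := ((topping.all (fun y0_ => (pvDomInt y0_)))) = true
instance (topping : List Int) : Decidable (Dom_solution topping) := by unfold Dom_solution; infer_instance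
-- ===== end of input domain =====

-- B replaces A's two precomputed distinct-count arrays and comparison pass with a single
-- incremental sweep maintaining a left set and a right counter (objective: alternative).

-- ===== PORT A =====
def stepA (topping : List Int) :
    PySem.Set Int × PySem.Set Int × List Int × List Int → Int →
    PySem.Set Int × PySem.Set Int × List Int × List Int
  | (s1, s2, li1, li2), i =>
    let s1' := PySem.Set.add s1 (PySem.List.pyGetD topping i 0)
    let li1' := PySem.List.pySetD li1 i (PySem.Set.len s1')
    let s2' := PySem.Set.add s2 (PySem.List.pyGetD topping (-(i + 1)) 0)
    let li2' := PySem.List.pySetD li2 (-(i + 1)) (PySem.Set.len s2')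
    (s1', s2', li1', li2')

def solution (topping : List Int) : Int :=
  let n : Int := (topping.length : Int)
  let li0 : List Int := (PySem.List.pyRange 0 n 1).map (fun _ => 0)
  let st := (PySem.List.pyRange 0 n 1).foldl (stepA topping)
    (PySem.Set.empty, PySem.Set.empty, li0, li0)
  (PySem.List.pyRange 0 (n - 1) 1).foldl
    (fun cnt i =>
      if PySem.List.pyGetD st.2.2.1 i 0 == PySem.List.pyGetD st.2.2.2 (i + 1) 0 then cnt + 1
      else cnt)
    0

-- ===== PORT B =====
def stepB (n : Int) :
    PySem.Set Int × PySem.Dict Int Int × Int → Int × Int →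
    PySem.Set Int × PySem.Dict Int Int × Int
  | (left, right, cnt), (i, t) =>
    let left' := PySem.Set.add left t
    let r1 := right.modify t 0 (fun v => v - 1)
    let right' := if r1.getD t 0 == 0 then r1.erase t else r1
    let cnt' := if i < n - 1 ∧ PySem.Set.len left' = (right'.size : Int) then cnt + 1 else cnt
    (left', right', cnt')

def solution_alt (topping : List Int) : Int :=
  let right := topping.foldl (fun (d : PySem.Dict Int Int) t => d.insert t (d.getD t 0 + 1))
    PySem.Dict.empty
  let n : Int := (topping.length : Int)
  ((PySem.List.enumerate topping 0).foldl (stepB n) (PySem.Set.empty, right, 0)).2.2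

-- ===== PRECONDITION & SPEC =====
def Spec_solution (topping : List Int) (out : Int) : Prop := out = solution_alt topping
instance (topping : List Int) (out : Int) : Decidable (Spec_solution topping out) := by unfold Spec_solution; infer_instance

-- ===== CLAIM (what is proved, stated in full; the proofs are below) =====
def Claim_equal_solution : Prop := ∀ (topping : List Int), Dom_solution topping → Spec_solution topping (solution topping)

-- ===== LEMMAS AND PROOFS =====
def dc (l : List Int) : Int := ((PySem.Set.ofList l).length : Int)

def cntAux (t : List Int) : Nat → List Int → Int
  | _, [] => 0
  | j, _ :: r' =>
    (if j + 1 < t.length ∧ dc (t.take (j + 1)) = dc (t.drop (j + 1)) then 1 else 0) +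
      cntAux t (j + 1) r'

theorem find?_filter_self (l : List (Int × Int)) (k : Int) :
    (l.filter (fun p => !(p.1 == k))).find? (fun p => p.1 == k) = none := by
  rw [List.find?_eq_none]
  intro x hx
  have := (List.mem_filter.1 hx).2
  simpa using this

theorem find?_filter_ne (l : List (Int × Int)) (k k' : Int) (h : k' ≠ k) :
    (l.filter (fun p => !(p.1 == k))).find? (fun p => p.1 == k') =
      l.find? (fun p => p.1 == k') := by
  induction l with
  | nil => rfl
  | cons a t ih =>
    rw [List.filter_cons]
    by_cases ha : a.1 = k
    · have h1 : (!(a.1 == k)) = false := by simp [ha]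
      have h2 : (a.1 == k') = false := by simp [ha]; omega
      rw [h1, if_neg (by simp), List.find?_cons_of_neg (by simp [h2]), ih]
    · have h1 : (!(a.1 == k)) = true := by simp [ha]
      rw [h1, if_pos rfl]
      by_cases h2 : a.1 = k'
      · rw [List.find?_cons_of_pos (by simp [h2]), List.find?_cons_of_pos (by simp [h2])]
      · rw [List.find?_cons_of_neg (by simp [h2]), List.find?_cons_of_neg (by simp [h2]), ih]

theorem get?_erase (d : PySem.Dict Int Int) (k k' : Int) :
    (d.erase k).get? k' = if k' = k then none else d.get? k' := by
  obtain ⟨items⟩ := d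
  simp only [PySem.Dict.erase, PySem.Dict.get?]
  by_cases h : k' = k
  · subst h; rw [if_pos rfl, find?_filter_self]; rfl
  · rw [if_neg h, find?_filter_ne _ _ _ h]

theorem contains_erase (d : PySem.Dict Int Int) (k k' : Int) :
    (d.erase k).contains k' = if k' = k then false else d.contains k' := by
  rw [PySem.Dict.contains_eq_isSome_get?, PySem.Dict.contains_eq_isSome_get?, get?_erase]
  by_cases h : k' = k <;> simp [h]

theorem getD_erase (d : PySem.Dict Int Int) (k k' v : Int) :
    (d.erase k).getD k' v = if k' = k then v else d.getD k' v := by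
  rw [PySem.Dict.getD_eq_get?_getD, PySem.Dict.getD_eq_get?_getD, get?_erase]
  by_cases h : k' = k <;> simp [h]

theorem keys_erase_sublist (d : PySem.Dict Int Int) (k : Int) :
    (d.erase k).keys.Sublist d.keys := by
  obtain ⟨items⟩ := d
  simp only [PySem.Dict.erase, PySem.Dict.keys]
  exact (List.filter_sublist).map _

theorem nodup_keys_erase (d : PySem.Dict Int Int) (k : Int) (h : d.keys.Nodup) :
    (d.erase k).keys.Nodup := h.sublist (keys_erase_sublist d k)

theorem size_eq_keys_length (d : PySem.Dict Int Int) : d.size = d.keys.length := by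
  obtain ⟨items⟩ := d
  simp [PySem.Dict.size, PySem.Dict.keys]

def InvB (r : List Int) (d : PySem.Dict Int Int) : Prop :=
  d.keys.Nodup ∧ (∀ k, d.getD k 0 = (r.count k : Int)) ∧ (∀ k, d.contains k = true ↔ k ∈ r)

theorem length_eq_ofList_of_mem_iff (l1 l2 : List Int) (h1 : l1.Nodup)
    (h : ∀ x, x ∈ l1 ↔ x ∈ l2) : (l1.length : Int) = dc l2 := by
  have hp : l1.Perm (PySem.Set.ofList l2) :=
    (List.perm_ext_iff_of_nodup h1 (PySem.Set.nodup_ofList l2)).2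
      (fun a => (h a).trans (PySem.Set.mem_ofList l2 a).symm)
  simp [dc, hp.length_eq]

theorem size_eq_dc (r : List Int) (d : PySem.Dict Int Int) (h : InvB r d) :
    (d.size : Int) = dc r := by
  obtain ⟨hnd, _, hc⟩ := h
  rw [size_eq_keys_length]
  exact length_eq_ofList_of_mem_iff _ _ hnd
    (fun x => (PySem.Dict.contains_iff_mem_keys d x).symm.trans (hc x))

theorem InvB_step (x : Int) (r' : List Int) (d : PySem.Dict Int Int) (h : InvB (x :: r') d) :
    InvB r' (if (d.modify x 0 (fun v => v - 1)).getD x 0 == 0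
      then (d.modify x 0 (fun v => v - 1)).erase x else d.modify x 0 (fun v => v - 1)) := by
  obtain ⟨hnd, hg, hc⟩ := h
  have hg1 : ∀ k, (d.modify x 0 (fun v => v - 1)).getD k 0 = (r'.count k : Int) := by
    intro k
    rw [PySem.Dict.getD_modify]
    by_cases hk : k = x
    · subst hk; rw [if_pos rfl, hg]; simp
    · rw [if_neg hk, hg]; simp [Ne.symm hk]
  have hc1 : ∀ k, (d.modify x 0 (fun v => v - 1)).contains k = true ↔ k ∈ x :: r' := by
    intro k
    rw [PySem.Dict.contains_modify]
    by_cases hk : k = x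
    · subst hk; simp
    · rw [show (k == x) = false by simp [hk], Bool.false_or]
      exact hc k
  have hnd1 : (d.modify x 0 (fun v => v - 1)).keys.Nodup := by
    have := PySem.Dict.keys_modify d x 0 (fun v => v - 1)
    have h2 := PySem.Dict.nodup_keys_insert d x ((fun v => v - 1) (d.getD x 0)) hnd
    -- keys of modify = keys of insert
    rw [this]; exact h2
  by_cases hz : (d.modify x 0 (fun v => v - 1)).getD x 0 == 0
  · have hx0 : r'.count x = 0 := by
      have := hg1 x; rw [this] at hz; exact_mod_cast (by simpa using hz : ((r'.count x : Int)) = 0)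
    have hxmem : x ∉ r' := by rwa [← List.count_eq_zero]
    rw [if_pos hz]
    refine ⟨nodup_keys_erase _ _ hnd1, ?_, ?_⟩
    · intro k
      rw [getD_erase]
      by_cases hk : k = x
      · subst hk; rw [if_pos rfl]; simp [List.count_eq_zero.2 hxmem]
      · rw [if_neg hk]; exact hg1 k
    · intro k
      rw [contains_erase]
      by_cases hk : k = x
      · subst hk; simp [hxmem]
      · rw [if_neg hk]
        exact (hc1 k).trans (by simp [hk])
  · have hx0 : r'.count x ≠ 0 := by
      intro h0
      apply hz
      rw [hg1 x, h0]; rfl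
    have hxmem : x ∈ r' := by
      by_contra hn; exact hx0 (List.count_eq_zero.2 hn)
    rw [if_neg hz]
    refine ⟨hnd1, hg1, fun k => (hc1 k).trans ?_⟩
    by_cases hk : k = x
    · subst hk; simp [hxmem]
    · simp [hk]

theorem Bloop (t : List Int) : ∀ (r p : List Int) (d : PySem.Dict Int Int) (c : Int),
    t = p ++ r → InvB r d →
    ((PySem.List.enumerate r ((p.length : Int))).foldl (stepB (t.length : Int))
      (PySem.Set.ofList p, d, c)).2.2 = c + cntAux t p.length r := by
  intro r
  induction r with
  | nil => intro p d c _ _; simp [PySem.List.enumerate_nil, cntAux]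
  | cons x r' ih =>
    intro p d c ht hinv
    rw [PySem.List.enumerate_cons, List.foldl_cons]
    have hstep : stepB (t.length : Int) (PySem.Set.ofList p, d, c) ((p.length : Int), x) =
        (PySem.Set.ofList (p ++ [x]),
         (if (d.modify x 0 (fun v => v - 1)).getD x 0 == 0
            then (d.modify x 0 (fun v => v - 1)).erase x else d.modify x 0 (fun v => v - 1)),
         if p.length + 1 < t.length ∧ dc (t.take (p.length + 1)) = dc (t.drop (p.length + 1))
           then c + 1 else c) := by
      simp only [stepB, PySem.Set.ofList_append_singleton]
      have htake : t.take (p.length + 1) = p ++ [x] := by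
        rw [ht, show p ++ x :: r' = (p ++ [x]) ++ r' by simp]
        exact List.take_left' (by simp)
      have hdrop : t.drop (p.length + 1) = r' := by
        rw [ht, show p ++ x :: r' = (p ++ [x]) ++ r' by simp]
        exact List.drop_left' (by simp)
      have hlen : PySem.Set.len ((PySem.Set.ofList p).add x) = dc (t.take (p.length + 1)) := by
        rw [htake, ← PySem.Set.ofList_append_singleton]; rfl
      have hsize : (((if (d.modify x 0 (fun v => v - 1)).getD x 0 == 0
            then (d.modify x 0 (fun v => v - 1)).erase x else d.modify x 0 (fun v => v - 1)).size : Nat) : Int)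
          = dc (t.drop (p.length + 1)) := by
        rw [hdrop]
        exact size_eq_dc r' _ (InvB_step x r' d hinv)
      have hiff : ((p.length : Int) < (t.length : Int) - 1 ↔ p.length + 1 < t.length) := by omega
      rw [hlen, hsize, if_congr (and_congr hiff Iff.rfl) rfl rfl]
    rw [hstep]
    have := ih (p ++ [x])
      (if (d.modify x 0 (fun v => v - 1)).getD x 0 == 0
        then (d.modify x 0 (fun v => v - 1)).erase x else d.modify x 0 (fun v => v - 1))
      (if p.length + 1 < t.length ∧ dc (t.take (p.length + 1)) = dc (t.drop (p.length + 1))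
        then c + 1 else c)
      (by rw [ht]; simp) (InvB_step x r' d hinv)
    rw [show (((p ++ [x]).length : Nat) : Int) = (p.length : Int) + 1 by simp] at this
    rw [this]
    show _ = c + cntAux t p.length (x :: r')
    rw [cntAux]
    simp only [List.length_append, List.length_singleton]
    split_ifs <;> ring

theorem solution_B_eq_cntAux (t : List Int) : solution_alt t = cntAux t 0 t := by
  unfold solution_alt
  rw [PySem.Dict.foldl_insert_getD_add_one_eq_counter]
  have h0 : InvB t (PySem.Dict.counter t) := by
    refine ⟨PySem.Dict.nodup_keys_counter t, PySem.Dict.getD_counter t, fun k => ?_⟩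
    rw [PySem.Dict.contains_counter]
    simp
  have := Bloop t t [] (PySem.Dict.counter t) 0 (by simp) h0
  simpa using this

theorem pySetD_neg (xs : List Int) (k : Nat) (v : Int) (h1 : 0 < k) (h2 : k ≤ xs.length) :
    PySem.List.pySetD xs (-(k : Int)) v = xs.set (xs.length - k) v := by
  simp only [PySem.List.pySetD, PySem.List.pySet?, PySem.List.pyIdx?]
  rw [if_neg (by omega), if_pos (by omega)]
  simp

theorem map_range_set (m k : Nat) (hk : k < m) (f g : Nat → Int) (v : Int)
    (hgv : g k = v) (hgf : ∀ i, i ≠ k → g i = f i) :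
    ((List.range m).map f).set k v = (List.range m).map g := by
  apply List.ext_getElem
  · simp
  · intro i h1 h2
    simp only [List.getElem_set, List.getElem_map, List.getElem_range]
    by_cases hik : i = k
    · subst hik; simp [hgv]
    · have hne : ¬ k = i := fun h => hik h.symm
      simp [hne, hgf i hik]

theorem dc_reverse (l : List Int) : ((PySem.Set.ofList l.reverse).length : Int) = dc l := by
  apply length_eq_ofList_of_mem_iff
  · exact PySem.Set.nodup_ofList _
  · intro x; rw [PySem.Set.mem_ofList, List.mem_reverse]

theorem Aloop (t : List Int) (k : Nat) (hk : k ≤ t.length) :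
    (PySem.List.pyRange 0 (k : Int) 1).foldl (stepA t)
      (PySem.Set.empty, PySem.Set.empty,
       (PySem.List.pyRange 0 (t.length : Int) 1).map (fun _ => 0),
       (PySem.List.pyRange 0 (t.length : Int) 1).map (fun _ => 0)) =
    (PySem.Set.ofList (t.take k),
     PySem.Set.ofList ((t.drop (t.length - k)).reverse),
     (List.range t.length).map (fun i => if i < k then dc (t.take (i + 1)) else 0),
     (List.range t.length).map (fun i => if t.length - k ≤ i then dc (t.drop i) else 0)) := by
  induction k with
  | zero =>
    rw [show ((0 : Nat) : Int) = 0 by simp, PySem.List.pyRange_one_eq_nil (le_refl 0),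
      List.foldl_nil]
    refine congrArg₂ _ ?_ (congrArg₂ _ ?_ (congrArg₂ _ ?_ ?_))
    · simp [PySem.Set.empty]
    · simp [PySem.Set.empty]
    · rw [PySem.List.pyRange_one]
      simp only [List.map_map]
      apply List.map_congr_left
      intro i hi
      simp
    · rw [PySem.List.pyRange_one]
      simp only [List.map_map]
      apply List.map_congr_left
      intro i hi
      have hi' : i < t.length := by have := List.mem_range.1 hi; omega
      simp [Nat.not_le.2 hi']
  | succ k ih =>
    have hk' : k ≤ t.length := Nat.le_of_succ_le hk
    have hkn : k < t.length := hk
    rw [show ((k + 1 : Nat) : Int) = (k : Int) + 1 by push_cast; ring,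
      PySem.List.pyRange_one_succ_right (by positivity), List.foldl_append, ih hk',
      List.foldl_cons, List.foldl_nil]
    simp only [stepA]
    have hget1 : PySem.List.pyGetD t (k : Int) 0 = t[k] := by
      rw [PySem.List.pyGetD_eq_getElem t 0 (by positivity) (by exact_mod_cast hkn)]
      simp
    have htake : t.take (k + 1) = t.take k ++ [t[k]] := by
      rw [List.take_add_one, List.getElem?_eq_getElem hkn]
      rfl
    have hs1 : (PySem.Set.ofList (t.take k)).add t[k] = PySem.Set.ofList (t.take (k + 1)) := by
      rw [htake, PySem.Set.ofList_append_singleton]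
    have hget2 : PySem.List.pyGetD t (-((k : Int) + 1)) 0 = t[t.length - (k + 1)] := by
      rw [show -((k : Int) + 1) = -((k + 1 : Nat) : Int) by push_cast; ring]
      exact PySem.List.pyGetD_neg_natCast t (k + 1) 0 (Nat.succ_pos k) hk
    have e1 : t.length - (k + 1) + 1 = t.length - k := by omega
    have hdrop : t.drop (t.length - (k + 1)) = t[t.length - (k + 1)] :: t.drop (t.length - k) := by
      rw [List.drop_eq_getElem_cons (by omega), e1]
    have hs2 : (PySem.Set.ofList ((t.drop (t.length - k)).reverse)).add t[t.length - (k + 1)] =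
        PySem.Set.ofList ((t.drop (t.length - (k + 1))).reverse) := by
      rw [hdrop, List.reverse_cons, PySem.Set.ofList_append_singleton]
    rw [hget1, hget2, hs1, hs2]
    refine congrArg₂ _ rfl (congrArg₂ _ rfl (congrArg₂ _ ?_ ?_))
    · rw [PySem.List.pySetD_natCast]
      apply map_range_set t.length k hkn _ _ _
      · simp [PySem.Set.len, dc]
      · intro i hik
        by_cases h : i < k
        · simp [h, Nat.lt_succ_of_lt h]
        · have : ¬ i < k + 1 := by omega
          simp [h, this]
    · rw [show -((k : Int) + 1) = -((k + 1 : Nat) : Int) by push_cast; ring,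
        pySetD_neg _ (k + 1) _ (Nat.succ_pos k) (by simpa using hk)]
      simp only [List.length_map, List.length_range]
      apply map_range_set t.length (t.length - (k + 1)) (by omega) _ _ _
      · rw [if_pos (le_refl _)]
        simp only [PySem.Set.len, dc]
        exact (dc_reverse _).symm
      · intro i hik
        by_cases h : t.length - (k + 1) ≤ i
        · rw [if_pos h, if_pos (by omega)]
        · rw [if_neg h, if_neg (by omega)]

theorem count_bridge (t : List Int) : ∀ (r : List Int) (j : Nat) (c : Int),
    j + r.length = t.length →
    (PySem.List.pyRange (j : Int) ((t.length : Int) - 1) 1).foldl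
      (fun cnt i =>
        if PySem.List.pyGetD
              ((List.range t.length).map (fun i => if i < t.length then dc (t.take (i + 1)) else 0)) i 0
            == PySem.List.pyGetD
              ((List.range t.length).map (fun i => if t.length - t.length ≤ i then dc (t.drop i) else 0)) (i + 1) 0
          then cnt + 1 else cnt) c
    = c + cntAux t j r := by
  intro r
  induction r with
  | nil =>
    intro j c hj
    simp only [List.length_nil, Nat.add_zero] at hj
    rw [PySem.List.pyRange_one_eq_nil (by omega), List.foldl_nil, cntAux]
    ring
  | cons x r' ih =>
    intro j c hj
    simp only [List.length_cons] at hj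
    by_cases hlast : j + 1 = t.length
    · have hr' : r' = [] := by
        have : r'.length = 0 := by omega
        exact List.length_eq_zero_iff.1 this
      rw [PySem.List.pyRange_one_eq_nil (by omega), List.foldl_nil, cntAux, hr', cntAux]
      rw [if_neg (by omega)]
      ring
    · have hjn : j + 1 < t.length := by omega
      rw [PySem.List.pyRange_one_cons (by omega), List.foldl_cons]
      have e1 : PySem.List.pyGetD
          ((List.range t.length).map (fun i => if i < t.length then dc (t.take (i + 1)) else 0)) (j : Int) 0
          = dc (t.take (j + 1)) := by
        rw [PySem.List.pyGetD_natCast,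
          PySem.List.getD_map_range _ _ _ _ (by omega), if_pos (by omega)]
      have e2 : PySem.List.pyGetD
          ((List.range t.length).map (fun i => if t.length - t.length ≤ i then dc (t.drop i) else 0)) ((j : Int) + 1) 0
          = dc (t.drop (j + 1)) := by
        rw [show ((j : Int) + 1) = ((j + 1 : Nat) : Int) by push_cast; ring,
          PySem.List.pyGetD_natCast,
          PySem.List.getD_map_range _ _ _ _ (by omega), if_pos (by omega)]
      rw [e1, e2]
      have := ih (j + 1) (if (dc (t.take (j + 1)) == dc (t.drop (j + 1))) = true then c + 1 else c) (by omega)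
      rw [show (((j + 1 : Nat)) : Int) = (j : Int) + 1 by push_cast; ring] at this
      rw [this, cntAux]
      by_cases hc : dc (t.take (j + 1)) = dc (t.drop (j + 1))
      · rw [if_pos (by exact beq_iff_eq.2 hc), if_pos (by exact ⟨hjn, hc⟩)]
        ring
      · rw [if_neg (by simpa using hc), if_neg (by intro h; exact hc h.2)]
        ring

theorem solution_A_eq_cntAux (t : List Int) : solution t = cntAux t 0 t := by
  have hA := Aloop t t.length (le_refl _)
  simp only [solution]
  rw [hA]
  have := count_bridge t t 0 0 (by omega)
  rw [show ((0 : Nat) : Int) = 0 by simp] at this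
  simpa using this

-- ===== VERDICT (by name: the statement is the Claim_ definition above) =====
theorem solution_spec : Claim_equal_solution := by
  intro t _
  unfold Spec_solution
  rw [solution_A_eq_cntAux, solution_B_eq_cntAux]
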